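-- pv_equiv track=rewrite | github.com/MrHamdulay/csc3-capstone | examples/data/Assignment_8/mckail001/question2.py | adjacent_pairs
-- ===== SOURCE A (Python) =====
-- def adjacent_pairs(message):
--     if len(message) == 1:
--         return 0
--     elif len(message) == 2:
--         if message[0] == message[1]:
--             return 1
--         else:
--             return 0
--     elif message[0] == message[1]:
--         return 1 + adjacent_pairs(message[2::]) #adds one to count if adjacent letters are equal
--     else:
--         return adjacent_pairs(message[1::]) #if adjacent letters are not equal, move onto next iteration
-- ===== SOURCE B (Python) =====
-- def adjacent_pairs(message):
--     count = 0
--     i = 0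
--     while i + 1 < len(message):
--         if message[i] == message[i + 1]:
--             count += 1
--             i += 2
--         else:
--             i += 1
--     return count
-- ===== Notes on version B (the rewrite author's own statement) =====
-- stated objective: faster
-- what changed: Replaced the slicing recursion (each step copies the rest of the string) with a single iterative index scan that skips two positions on a match and one otherwise.
import Mathlib
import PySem

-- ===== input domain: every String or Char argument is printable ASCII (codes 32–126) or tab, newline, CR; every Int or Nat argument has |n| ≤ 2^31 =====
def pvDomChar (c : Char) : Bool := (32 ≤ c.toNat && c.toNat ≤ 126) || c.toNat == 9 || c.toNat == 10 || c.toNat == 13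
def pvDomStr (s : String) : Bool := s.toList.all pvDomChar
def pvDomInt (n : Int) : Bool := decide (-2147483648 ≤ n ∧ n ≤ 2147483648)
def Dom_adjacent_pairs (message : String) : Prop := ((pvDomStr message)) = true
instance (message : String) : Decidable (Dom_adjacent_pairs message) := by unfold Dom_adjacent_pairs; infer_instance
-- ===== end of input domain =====

-- B replaces A's slicing recursion by one iterative index pass; equivalence is claimed
-- on non-empty strings (Python A raises IndexError on "").

-- ===== PORT A =====
-- A's slicing recursion on the character list; the leading 'l = []' test is only a
-- totality guard (Python A raises IndexError there; "" is excluded by Pre_).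
def adjacentPairsRecA (l : List Char) : Int :=
  if l = [] then 0
  else if l.length = 1 then 0
  else if l.length = 2 then
    if l.headD ' ' = (l.drop 1).headD ' ' then 1 else 0
  else if l.headD ' ' = (l.drop 1).headD ' ' then
    1 + adjacentPairsRecA (l.drop 2)
  else
    adjacentPairsRecA (l.drop 1)
termination_by l.length
decreasing_by
  · cases l with
    | nil => simp_all
    | cons a t => cases t with
      | nil => simp_all
      | cons b u => simp
  · cases l with
    | nil => simp_all
    | cons a t => simp [List.drop]

def adjacent_pairs (message : String) : Int := adjacentPairsRecA message.toList

-- ===== PORT B =====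
-- B's while loop: index i, count accumulator; skip 2 on a match, else 1.
-- 'fuel' is only a totality device; fuel = length is always enough (proved below).
def adjacentPairsLoopB (s : List Char) : Nat → Nat → Int → Int
  | 0, _, count => count
  | fuel + 1, i, count =>
    if i + 1 < s.length then
      if s.getD i ' ' = s.getD (i + 1) ' ' then
        adjacentPairsLoopB s fuel (i + 2) (count + 1)
      else
        adjacentPairsLoopB s fuel (i + 1) count
    else count

def adjacent_pairs_alt (message : String) : Int :=
  adjacentPairsLoopB message.toList message.toList.length 0 0

-- ===== PRECONDITION & SPEC =====
-- Pre_ excludes only the empty string, on which Python A raises IndexError.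
def Pre_adjacent_pairs (message : String) : Prop := message ≠ ""
instance (message : String) : Decidable (Pre_adjacent_pairs message) := by unfold Pre_adjacent_pairs; infer_instance
def pvWitness_adjacent_pairs : String := "aabba"

def Spec_adjacent_pairs (message : String) (out : Int) : Prop := out = adjacent_pairs_alt message
instance (message : String) (out : Int) : Decidable (Spec_adjacent_pairs message out) := by unfold Spec_adjacent_pairs; infer_instance

-- ===== CLAIM (what is proved, stated in full; the proofs are below) =====
def Claim_equal_adjacent_pairs : Prop := ∀ (message : String), Dom_adjacent_pairs message → Pre_adjacent_pairs message → Spec_adjacent_pairs message (adjacent_pairs message)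

-- ===== LEMMAS AND PROOFS =====

theorem recA_small (l : List Char) (h : l.length ≤ 1) : adjacentPairsRecA l = 0 := by
  match l, h with
  | [], _ => rw [adjacentPairsRecA]; simp
  | [a], _ => rw [adjacentPairsRecA]; simp

-- The loop from index i, with enough fuel, computes count plus A's recursion on the suffix.
theorem loopB_eq_recA (s : List Char) (fuel i : Nat) (count : Int)
    (hf : s.length ≤ i + 1 + fuel) :
    adjacentPairsLoopB s fuel i count = count + adjacentPairsRecA (s.drop i) := by
  induction fuel generalizing i count with
  | zero =>
    rw [adjacentPairsLoopB, recA_small (s.drop i) (by simp; omega)]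
    ring
  | succ fuel ih =>
    rw [adjacentPairsLoopB]
    by_cases h1 : i + 1 < s.length
    · rw [if_pos h1]
      have hd : s.drop i ≠ [] := by
        intro he; have := List.drop_eq_nil_iff.mp he; omega
      have hlen : (s.drop i).length = s.length - i := List.length_drop ..
      have hhead : (s.drop i).headD ' ' = s.getD i ' ' := by
        simp [List.headD_eq_head?_getD, List.head?_drop, List.getD]
      have hhead2 : ((s.drop i).drop 1).headD ' ' = s.getD (i + 1) ' ' := by
        rw [List.drop_drop]
        simp [List.headD_eq_head?_getD, List.head?_drop, List.getD]
      rw [adjacentPairsRecA, if_neg hd, hlen, hhead, hhead2]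
      by_cases h2 : s.length - i = 2
      · rw [if_neg (by omega : ¬ s.length - i = 1), if_pos h2]
        by_cases he : s.getD i ' ' = s.getD (i + 1) ' '
        · rw [if_pos he, if_pos he, ih (i + 2) (count + 1) (by omega),
            recA_small (s.drop (i + 2)) (by simp; omega)]
          ring
        · rw [if_neg he, if_neg he, ih (i + 1) count (by omega),
            recA_small (s.drop (i + 1)) (by simp; omega)]
      · rw [if_neg (by omega : ¬ s.length - i = 1), if_neg h2]
        by_cases he : s.getD i ' ' = s.getD (i + 1) ' '
        · rw [if_pos he, if_pos he, ih (i + 2) (count + 1) (by omega)]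
          simp [List.drop_drop]
          ring
        · rw [if_neg he, if_neg he, ih (i + 1) count (by omega)]
          simp [List.drop_drop]
    · rw [if_neg h1, recA_small (s.drop i) (by simp; omega)]
      ring

-- ===== VERDICT (by name: the statement is the Claim_ definition above) =====
theorem adjacent_pairs_spec : Claim_equal_adjacent_pairs := by
  intro message _ _
  unfold Spec_adjacent_pairs adjacent_pairs adjacent_pairs_alt
  rw [loopB_eq_recA message.toList message.toList.length 0 0 (by omega)]
  simp
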